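-- pv_equiv track=rewrite | github.com/RATHOD-SHUBHAM/DataStructure-And-Algorithm | Striver/Stack/Prefix, Infix, Postfix/Postfix to Infix Conversion/sol.py | postToInfix
-- ===== SOURCE A (Python) =====
-- def postToInfix(exp):
--     n = len(exp)
--
--     st = []
--
--     i = 0
--
--     while i < n:
--         ch = exp[i]
--
--         if ('A' <= ch <= 'Z') or ('a' <= ch <= 'z') or ('0' <= ch <= '9'):
--             '''
--                 ch.isalpha() or ch.isdigit()
--             '''
--             # This is a Operand
--             st.append(ch)
--
--         else:
--             '''
--                 Pop the top 2 operands
--                 add operator between the 2 operands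
--                 Push back to stack
--             '''
--             ele_2 = st.pop()
--             ele_1 = st.pop()
--
--             new_str = '(' + ele_1 + ch + ele_2 + ')'
--
--             st.append(new_str)
--
--         i += 1
--
--     infix_exp = st.pop()
--     return infix_exp
-- ===== SOURCE B (Python) =====
-- def postToInfix(exp):
--     # Build an expression tree from the postfix string, then render it once
--     # into a list of tokens and join them: O(n) instead of repeated string
--     # concatenation.
--     st = []
--     for ch in exp:
--         if ('A' <= ch <= 'Z') or ('a' <= ch <= 'z') or ('0' <= ch <= '9'):
--             st.append(ch)
--         else:
--             right = st.pop()
--             left = st.pop()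
--             st.append((ch, left, right))
--     tree = st.pop()
--
--     pieces = []
--
--     def emit(node):
--         if isinstance(node, str):
--             pieces.append(node)
--         else:
--             op, left, right = node
--             pieces.append('(')
--             emit(left)
--             pieces.append(op)
--             emit(right)
--             pieces.append(')')
--
--     emit(tree)
--     return ''.join(pieces)
-- ===== Notes on version B (the rewrite author's own statement) =====
-- stated objective: faster
-- what changed: B builds an expression tree instead of A's stack of repeatedly concatenated strings, and renders it once into a token list joined at the end; Pre_ excludes only the inputs on which A raises IndexError (stack underflow / final pop on empty stack), where B raises too.
import Mathlib
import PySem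

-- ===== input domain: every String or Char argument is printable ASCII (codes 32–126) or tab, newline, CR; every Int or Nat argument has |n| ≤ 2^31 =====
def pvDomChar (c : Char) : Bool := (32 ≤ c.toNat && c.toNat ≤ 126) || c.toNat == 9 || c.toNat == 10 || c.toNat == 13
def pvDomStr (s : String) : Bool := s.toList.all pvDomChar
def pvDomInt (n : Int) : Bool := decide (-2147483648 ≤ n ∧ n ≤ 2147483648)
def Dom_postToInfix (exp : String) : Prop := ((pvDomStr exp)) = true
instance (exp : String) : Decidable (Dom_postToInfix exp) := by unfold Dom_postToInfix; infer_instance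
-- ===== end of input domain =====

-- B builds an expression tree and renders it once with a join, instead of A's stack of
-- repeatedly concatenated strings (objective: faster string building).

-- ===== PORT A =====
-- the operand test ('A'<=ch<='Z' or 'a'<=ch<='z' or '0'<=ch<='9'), shared by both Pythons
def isOperandCh (c : Char) : Bool :=
  ('A' ≤ c && c ≤ 'Z') || ('a' ≤ c && c ≤ 'z') || ('0' ≤ c && c ≤ '9')

-- A's while loop: stack of strings (as char lists, head = top); none = IndexError on st.pop()
def runA : List Char → List (List Char) → Option (List (List Char))
  | [], st => some st
  | c :: rest, st =>
    if isOperandCh c then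
      runA rest ([c] :: st)
    else
      match st with
      | e2 :: e1 :: s => runA rest (('(' :: e1 ++ c :: e2 ++ [')']) :: s)
      | _ => none

def postToInfix (exp : String) : String :=
  match runA exp.toList [] with
  | some (top :: _) => String.ofList top
  | _ => ""   -- unreachable under Pre_: Python A raises IndexError here

-- ===== PORT B =====
-- B's expression tree: a leaf operand or an operator node with left/right subtrees
inductive PTree : Type
  | leaf : Char → PTree
  | node : Char → PTree → PTree → PTree
deriving DecidableEq, Repr

-- B's first loop: build the tree stack (head = top); none = IndexError on st.pop()
def buildB : List Char → List PTree → Option (List PTree)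
  | [], st => some st
  | c :: rest, st =>
    if isOperandCh c then
      buildB rest (PTree.leaf c :: st)
    else
      match st with
      | r :: l :: s => buildB rest (PTree.node c l r :: s)
      | _ => none

-- B's emit: append this node's tokens to pieces
def emitB : PTree → List String → List String
  | PTree.leaf c, pieces => pieces ++ [String.ofList [c]]
  | PTree.node op l r, pieces =>
      emitB r (emitB l (pieces ++ ["("]) ++ [String.ofList [op]]) ++ [")"]

def postToInfix_alt (exp : String) : String :=
  match buildB exp.toList [] with
  | none => ""   -- unreachable under Pre_: Python B raises IndexError here
  | some st =>
    match st with
    | [] => ""   -- unreachable under Pre_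
    | t :: _ => String.join (emitB t [])

-- ===== PRECONDITION & SPEC =====
-- Pre_ excludes exactly the inputs on which Python A raises IndexError (a pop on a stack with
-- too few elements, including the final pop on the empty stack); B raises there as well.
def preAux : Nat → List Char → Bool
  | s, [] => decide (1 ≤ s)
  | s, c :: rest => if isOperandCh c then preAux (s + 1) rest else decide (2 ≤ s) && preAux (s - 1) rest

def Pre_postToInfix (exp : String) : Prop := preAux 0 exp.toList = true
instance (exp : String) : Decidable (Pre_postToInfix exp) := by unfold Pre_postToInfix; infer_instance

def pvWitness_postToInfix : String := "ab+c*"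

def Spec_postToInfix (exp : String) (out : String) : Prop := out = postToInfix_alt exp
instance (exp : String) (out : String) : Decidable (Spec_postToInfix exp out) := by unfold Spec_postToInfix; infer_instance

-- ===== CLAIM (what is proved, stated in full; the proofs are below) =====
def Claim_equal_postToInfix : Prop := ∀ (exp : String), Dom_postToInfix exp → Pre_postToInfix exp → Spec_postToInfix exp (postToInfix exp)

-- ===== LEMMAS AND PROOFS =====

-- the string A keeps on its stack for the tree B keeps there
def PTree.str : PTree → List Char
  | PTree.leaf c => [c]
  | PTree.node op l r => '(' :: l.str ++ op :: r.str ++ [')']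

-- emitB only appends to pieces
theorem emitB_shift : ∀ (t : PTree) (acc : List String),
    emitB t acc = acc ++ emitB t [] := by
  intro t
  induction t with
  | leaf c => intro acc; simp [emitB]
  | node op l r ihl ihr =>
    intro acc
    simp only [emitB, List.nil_append]
    rw [ihr, ihr (emitB l ["("] ++ [String.ofList [op]]), ihl, ihl ["("]]
    simp

-- joining the emitted pieces gives the same characters as A's concatenated string
theorem emitB_flatten : ∀ (t : PTree), ((emitB t []).map String.toList).flatten = t.str := by
  intro t
  induction t with
  | leaf c => simp [emitB, PTree.str]
  | node op l r ihl ihr =>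
    simp only [emitB, PTree.str]
    rw [emitB_shift r, emitB_shift l]
    simp only [List.nil_append, List.map_append, List.flatten_append, ihl, ihr]
    simp [String.toList_ofList]

theorem join_emitB : ∀ (t : PTree), String.join (emitB t []) = String.ofList t.str := by
  intro t
  rw [← String.toList_inj]
  simp [String.toList_join, emitB_flatten, String.toList_ofList]

-- A's stack is the element-wise rendering of B's stack
theorem build_runA : ∀ (l : List Char) (ts : List PTree),
    runA l (ts.map PTree.str) = Option.map (List.map PTree.str) (buildB l ts) := by
  intro l
  induction l with
  | nil => intro ts; simp [runA, buildB]
  | cons c rest ih =>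
    intro ts
    by_cases hop : isOperandCh c = true
    · simpa [runA, buildB, hop] using ih (PTree.leaf c :: ts)
    · match ts with
      | [] => simp [runA, buildB, hop]
      | [t] => simp [runA, buildB, hop]
      | t2 :: t1 :: s =>
        simpa [runA, buildB, hop, PTree.str] using ih (PTree.node c t1 t2 :: s)

-- under the balance precondition A's run succeeds with a nonempty stack
theorem runA_pre : ∀ (l : List Char) (st : List (List Char)),
    preAux st.length l = true → ∃ top t, runA l st = some (top :: t) := by
  intro l
  induction l with
  | nil =>
    intro st hpre
    simp [preAux] at hpre
    match st, hpre with
    | top :: t, _ => exact ⟨top, t, by simp [runA]⟩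
  | cons c rest ih =>
    intro st hpre
    simp only [preAux] at hpre
    by_cases hop : isOperandCh c = true
    · rw [if_pos hop] at hpre
      obtain ⟨top, t, h⟩ := ih ([c] :: st) (by simpa using hpre)
      exact ⟨top, t, by simpa [runA, hop] using h⟩
    · rw [if_neg hop] at hpre
      simp only [Bool.and_eq_true, decide_eq_true_eq] at hpre
      obtain ⟨hge, hpre'⟩ := hpre
      match st, hge with
      | e2 :: e1 :: s, _ =>
        obtain ⟨top, t, h⟩ := ih (('(' :: e1 ++ c :: e2 ++ [')']) :: s)
          (by simpa using hpre')
        exact ⟨top, t, by simpa [runA, hop] using h⟩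

-- ===== VERDICT =====
theorem postToInfix_spec : Claim_equal_postToInfix := by
  intro exp _hdom hpre
  unfold Spec_postToInfix postToInfix postToInfix_alt
  obtain ⟨top, t, hrun⟩ := runA_pre exp.toList [] (by simpa [Pre_postToInfix] using hpre)
  have hb := build_runA exp.toList []
  simp only [List.map_nil] at hb
  rw [hrun] at hb
  match hB : buildB exp.toList [] with
  | none => rw [hB] at hb; simp at hb
  | some [] => rw [hB] at hb; simp at hb
  | some (tt :: ts) =>
    rw [hB] at hb
    simp only [Option.map_some, List.map_cons, Option.some.injEq, List.cons.injEq] at hb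
    rw [hrun]
    show String.ofList top = String.join (emitB tt [])
    rw [join_emitB, hb.1]
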